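-- pv_equiv track=rewrite | github.com/newnol/crypto1_dlp | project_02_01/test_generator.py | create_test_input
-- ===== SOURCE A (Python) =====
-- def int_to_lsb_hex(n: int) -> str:
--     """
--     Convert integer to LSB-to-MSB hex string format.
--     Example: 255 (0xFF) -> "FF", 256 (0x100) -> "001"
--     The format is: h_0*16^0 + h_1*16^1 + ... + h_k*16^k
--     So we output hex digits from least significant to most significant (left to right).
--     """
--     if n == 0:
--         return "0"
--
--     result = []
--     n = int(n)
--     while n > 0:
--         digit = n & 0xF
--         if digit < 10:
--             result.append(chr(ord('0') + digit))
--         else: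
--             result.append(chr(ord('A') + digit - 10))
--         n >>= 4
--
--     return ''.join(result)
--
-- def create_test_input(p: int, prime_factors: list, g: int) -> str:
--     """Create test input string in the required format."""
--     lines = []
--
--     # Line 1: p in LSB hex
--     lines.append(int_to_lsb_hex(p))
--
--     # Line 2: n (number of prime factors) in LSB hex
--     n = len(prime_factors)
--     lines.append(int_to_lsb_hex(n))
--
--     # Line 3: prime factors in LSB hex, space-separated
--     factors_hex = [int_to_lsb_hex(f) for f in prime_factors]
--     lines.append(' '.join(factors_hex))
--
--     # Line 4: g in LSB hex
--     lines.append(int_to_lsb_hex(g))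
--
--     return '\n'.join(lines)
-- ===== SOURCE B (Python) =====
-- _DIGITS = "0123456789ABCDEF"
--
-- def _lsb(n: int) -> str:
--     # base case n <= 0 also guards recursion termination
--     return "" if n <= 0 else _DIGITS[n & 15] + _lsb(n >> 4)
--
-- def int_to_lsb_hex(n: int) -> str:
--     return "0" if n == 0 else _lsb(int(n))
--
-- def create_test_input(p: int, prime_factors: list, g: int) -> str:
--     return "\n".join([
--         int_to_lsb_hex(p),
--         int_to_lsb_hex(len(prime_factors)),
--         " ".join(map(int_to_lsb_hex, prime_factors)),
--         int_to_lsb_hex(g),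
--     ])
-- ===== Notes on version B (the rewrite author's own statement) =====
-- stated objective: simpler
-- what changed: int_to_lsb_hex's imperative digit-extraction loop with chr() arithmetic and an accumulator list is replaced by a short structural recursion indexing a hex-digit table, and create_test_input's line-list building by a single join expression.
import Mathlib
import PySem

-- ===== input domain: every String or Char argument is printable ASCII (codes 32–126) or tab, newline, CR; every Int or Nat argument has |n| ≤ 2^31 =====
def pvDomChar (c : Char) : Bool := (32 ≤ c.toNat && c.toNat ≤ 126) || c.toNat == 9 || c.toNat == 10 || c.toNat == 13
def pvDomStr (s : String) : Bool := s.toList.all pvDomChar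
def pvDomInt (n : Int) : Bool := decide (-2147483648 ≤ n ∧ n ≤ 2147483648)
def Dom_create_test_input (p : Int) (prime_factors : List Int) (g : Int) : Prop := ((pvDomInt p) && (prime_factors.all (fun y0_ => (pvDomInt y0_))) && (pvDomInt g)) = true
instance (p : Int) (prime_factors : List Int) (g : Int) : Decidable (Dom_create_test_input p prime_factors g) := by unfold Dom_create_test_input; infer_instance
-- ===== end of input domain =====

-- B replaces A's imperative digit-extraction loop (chr arithmetic + accumulator list) by a
-- short structural recursion over a hex-digit table, and the line-list building by one join;
-- same cost, simpler code.

-- ===== PORT A =====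
-- the while loop of int_to_lsb_hex: state (n, result); strings handled as List Char
def pvLoopA (n : Int) (result : List Char) : List Char :=
  if _h : 0 < n then
    let digit := PySem.Int.band n 15
    let c : Char := if digit < 10 then Char.ofNat ('0'.toNat + digit.toNat)
                    else Char.ofNat ((('A'.toNat : Int) + digit - 10).toNat)
    pvLoopA (n >>> (4:Nat)) (result ++ [c])
  else result
termination_by n.toNat
decreasing_by
  have h16 : n >>> (4:Nat) = n / 16 := by simp [Int.shiftRight_eq_div_pow]
  have hn : n = ((n.toNat : Nat) : Int) := by omega
  have h1 : n / 16 = ((n.toNat / 16 : Nat) : Int) := by rw [hn]; exact_mod_cast rfl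
  have h2 : n.toNat / 16 < n.toNat := Nat.div_lt_self (by omega) (by norm_num)
  rw [h16]; omega

def pvHexA (n : Int) : List Char :=
  if n = 0 then ['0'] else pvLoopA n []

def create_test_input (p : Int) (prime_factors : List Int) (g : Int) : String :=
  let lines : List (List Char) := []
  let lines := lines ++ [pvHexA p]
  let n : Int := prime_factors.length
  let lines := lines ++ [pvHexA n]
  let factors_hex := prime_factors.map pvHexA
  let lines := lines ++ [PySem.Chars.join [' '] factors_hex]
  let lines := lines ++ [pvHexA g]
  String.ofList (PySem.Chars.join ['\n'] lines)

-- ===== PORT B =====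
def pvDigitsB : List Char := "0123456789ABCDEF".toList

def pvLsbB (n : Int) : List Char :=
  if _h : n ≤ 0 then []
  else pvDigitsB.getD (PySem.Int.band n 15).toNat '0' :: pvLsbB (n >>> (4:Nat))
termination_by n.toNat
decreasing_by
  have h16 : n >>> (4:Nat) = n / 16 := by simp [Int.shiftRight_eq_div_pow]
  have hn : n = ((n.toNat : Nat) : Int) := by omega
  have h1 : n / 16 = ((n.toNat / 16 : Nat) : Int) := by rw [hn]; exact_mod_cast rfl
  have h2 : n.toNat / 16 < n.toNat := Nat.div_lt_self (by omega) (by norm_num)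
  rw [h16]; omega

def pvHexB (n : Int) : List Char :=
  if n = 0 then ['0'] else pvLsbB n

def create_test_input_alt (p : Int) (prime_factors : List Int) (g : Int) : String :=
  String.ofList (PySem.Chars.join ['\n']
    [ pvHexB p
    , pvHexB (prime_factors.length : Int)
    , PySem.Chars.join [' '] (prime_factors.map pvHexB)
    , pvHexB g ])

-- ===== PRECONDITION & SPEC =====
def Spec_create_test_input (p : Int) (prime_factors : List Int) (g : Int) (out : String) : Prop := out = create_test_input_alt p prime_factors g
instance (p : Int) (prime_factors : List Int) (g : Int) (out : String) : Decidable (Spec_create_test_input p prime_factors g out) := by unfold Spec_create_test_input; infer_instance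

-- ===== CLAIM (what is proved, stated in full; the proofs are below) =====
def Claim_equal_create_test_input : Prop := ∀ (p : Int) (prime_factors : List Int) (g : Int), Dom_create_test_input p prime_factors g → Spec_create_test_input p prime_factors g (create_test_input p prime_factors g)

-- ===== LEMMAS AND PROOFS =====

-- A's digit character equals B's table lookup, for the digit of a positive n
lemma pvDigit_eq (n : Int) (hn : 0 < n) :
    (if PySem.Int.band n 15 < 10 then Char.ofNat ('0'.toNat + (PySem.Int.band n 15).toNat)
     else Char.ofNat ((('A'.toNat : Int) + PySem.Int.band n 15 - 10).toNat))
    = pvDigitsB.getD (PySem.Int.band n 15).toNat '0' := by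
  have hb : PySem.Int.band n 15 = ((n.toNat &&& 15 : Nat) : Int) :=
    PySem.Int.band_of_nonneg (le_of_lt hn) (by norm_num)
  rw [hb]
  have hle : n.toNat &&& 15 ≤ 15 := Nat.and_le_right
  set m : Nat := n.toNat &&& 15 with hm
  interval_cases m <;> decide

-- loop invariant: the A loop appends exactly B's recursive result
lemma pvLoopA_eq (n : Int) (acc : List Char) : pvLoopA n acc = acc ++ pvLsbB n := by
  induction n using pvLsbB.induct generalizing acc with
  | case1 n h =>
      rw [pvLoopA, pvLsbB]
      simp [h, not_lt.mpr h]
  | case2 n h ih =>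
      rw [pvLoopA, pvLsbB]
      have hpos : 0 < n := by omega
      simp only [dif_pos hpos, dif_neg h]
      rw [ih, pvDigit_eq n hpos]
      simp

lemma pvHexA_eq (n : Int) : pvHexA n = pvHexB n := by
  unfold pvHexA pvHexB
  split
  · rfl
  · simpa using pvLoopA_eq n []

-- ===== VERDICT (by name: the statement is the Claim_ definition above) =====
theorem create_test_input_spec : Claim_equal_create_test_input := by
  intro p prime_factors g _
  unfold Spec_create_test_input create_test_input create_test_input_alt
  rw [show pvHexA = pvHexB from funext pvHexA_eq]
  rfl
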